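-- pv_equiv track=rewrite | github.com/Abiiiigjj/Sentinel-Ai | src/backend/services/nlp_analysis_service.py | _sample_chunks
-- ===== SOURCE A (Python) =====
-- def _sample_chunks(chunks: list[str], max_total_chars: int = 6000) -> str:
--     """Sample representative chunks from document."""
--     if not chunks:
--         return ""
--
--     if len(chunks) == 1:
--         return chunks[0]
--
--     # Take first, last, and evenly distributed middle chunks
--     sample_indices = [0]  # First chunk
--
--     if len(chunks) > 2:
--         # Add middle chunks
--         step = max(1, len(chunks) // 4)
--         for i in range(step, len(chunks) - 1, step):
--             sample_indices.append(i)
--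
--     sample_indices.append(len(chunks) - 1)  # Last chunk
--
--     # Remove duplicates and sort
--     sample_indices = sorted(set(sample_indices))
--
--     # Combine sampled chunks
--     combined: list[str] = []
--     current_length: int = 0
--
--     for idx in sample_indices:
--         chunk: str = chunks[idx]
--         chunk_len: int = len(chunk)
--         total: int = int(current_length) + int(chunk_len)
--         if total > max_total_chars:
--             remaining: int = int(max_total_chars) - int(current_length)
--             if remaining > 200:
--                 partial: str = chunk[0:remaining]
--                 combined.append(partial)
--             break
--         combined.append(chunk)
--         current_length = int(total) + 2  # type: ignore[assignment]  # +2 for separator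
--
--     return "\n\n".join(combined)
-- ===== SOURCE B (Python) =====
-- def _sample_chunks(chunks: list[str], max_total_chars: int = 6000) -> str:
--     """Sample representative chunks (recursive budget-countdown formulation)."""
--     if not chunks:
--         return ""
--     n = len(chunks)
--     if n == 1:
--         return chunks[0]
--
--     # Index selection as a recursive stride walk: first index, the multiples of
--     # `step` strictly below n-1, then the last index. No set/sort needed: the
--     # walk is already strictly increasing, so it never produces a duplicate.
--     def middles(i: int, step: int) -> list[int]:
--         if i >= n - 1:
--             return []
--         return [i] + middles(i + step, step)
--
--     if n > 2:
--         step = max(1, n // 4)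
--         indices = [0] + middles(step, step) + [n - 1]
--     else:
--         indices = [0, n - 1]
--
--     # Emit the result string directly, counting the budget DOWN; each taken
--     # chunk costs len + 2 (separator), a chunk that no longer fits is truncated
--     # to the remaining budget when more than 200 chars of budget are left.
--     def emit(idxs: list[int], budget: int, first: bool) -> str:
--         if not idxs:
--             return ""
--         s = chunks[idxs[0]]
--         sep = "" if first else "\n\n"
--         if len(s) > budget:
--             return sep + s[:budget] if budget > 200 else ""
--         return sep + s + emit(idxs[1:], budget - len(s) - 2, False)
--
--     return emit(indices, max_total_chars, True)
-- ===== Notes on version B (the rewrite author's own statement) =====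
-- stated objective: alternative
-- what changed: A's imperative pipeline (build index list, dedup via set, sort, then a stateful accumulate loop appending to a list that is joined at the end) is replaced by two recursions: a stride walk that generates the strictly increasing sample indices directly (no set, no sort), and an emitter that counts the character budget DOWN and concatenates the output string with its separators as it recurses (no intermediate list, no join).
import Mathlib
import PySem

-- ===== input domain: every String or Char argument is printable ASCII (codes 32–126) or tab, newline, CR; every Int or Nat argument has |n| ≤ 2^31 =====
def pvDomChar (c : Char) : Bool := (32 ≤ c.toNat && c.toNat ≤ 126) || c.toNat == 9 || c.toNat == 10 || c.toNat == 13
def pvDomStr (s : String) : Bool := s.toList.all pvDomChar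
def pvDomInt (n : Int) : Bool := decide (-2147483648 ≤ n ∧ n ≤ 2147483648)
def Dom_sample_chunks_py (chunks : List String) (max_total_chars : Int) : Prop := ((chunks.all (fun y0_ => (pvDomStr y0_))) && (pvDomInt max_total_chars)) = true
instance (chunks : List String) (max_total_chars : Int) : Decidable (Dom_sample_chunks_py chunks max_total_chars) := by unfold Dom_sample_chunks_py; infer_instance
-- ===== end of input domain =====

-- B replaces A's build-indices/set/sort + stateful accumulate-then-join pipeline by two
-- recursions: a stride walk generating the sample indices directly (no set, no sort) and
-- an emitter that counts the budget down and concatenates the output string as it goes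
-- (no intermediate list, no join). Objective: alternative (same cost).

-- ===== PORT A =====
-- the for-idx loop of A: state = (combined, current_length), break modelled by returning
def sampleLoopA (chunks : List String) (M : Int) : List Int → List String → Int → List String
  | [], comb, _ => comb
  | idx :: rest, comb, cur =>
    let chunk := (PySem.List.pyGet? chunks idx).getD ""
    let chunk_len := PySem.Str.len chunk
    let total := cur + chunk_len
    if total > M then
      if M - cur > 200 then comb ++ [PySem.Str.slice chunk (some 0) (some (M - cur))]
      else comb
    else sampleLoopA chunks M rest (comb ++ [chunk]) (total + 2)

def sampleIndices (chunks : List String) : List Int :=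
  PySem.List.sorted
    (PySem.Set.ofList
      ([(0 : Int)] ++
        (if ((chunks.length : Int) > 2) then
          PySem.List.pyRange (max 1 (PySem.Int.floordiv (chunks.length : Int) 4))
            ((chunks.length : Int) - 1) (max 1 (PySem.Int.floordiv (chunks.length : Int) 4))
         else []) ++ [(chunks.length : Int) - 1]))
    (fun x => x) false

def sample_chunks_py (chunks : List String) (max_total_chars : Int) : String :=
  if chunks = [] then ""
  else if chunks.length = 1 then (PySem.List.pyGet? chunks 0).getD ""
  else
    PySem.Str.join "\n\n" (sampleLoopA chunks max_total_chars (sampleIndices chunks) [] 0)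

-- ===== PORT B =====
-- Source B's `middles(i, step)` stride walk; the Nat argument is a fuel bound making the
-- recursion structural (never exhausted at the call site, where step ≥ 1).
def middlesB (nm1 step : Int) : Nat → Int → List Int
  | 0, _ => []
  | fuel + 1, i => if i < nm1 then i :: middlesB nm1 step fuel (i + step) else []

-- Source B's `indices`: first, the stride walk's middles, last
def indicesB (chunks : List String) : List Int :=
  if ((chunks.length : Int) > 2) then
    [0] ++
      middlesB ((chunks.length : Int) - 1) (max 1 (PySem.Int.floordiv (chunks.length : Int) 4))
        chunks.length (max 1 (PySem.Int.floordiv (chunks.length : Int) 4)) ++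
      [(chunks.length : Int) - 1]
  else [0, (chunks.length : Int) - 1]

-- Source B's `emit(idxs, budget, first)`: budget counts down, output built directly
def emitB (chunks : List String) : List Int → Int → Bool → String
  | [], _, _ => ""
  | i :: rest, budget, first =>
    let s := (PySem.List.pyGet? chunks i).getD ""
    let sep := if first then "" else "\n\n"
    if PySem.Str.len s > budget then
      if budget > 200 then sep ++ PySem.Str.slice s none (some budget) else ""
    else sep ++ s ++ emitB chunks rest (budget - PySem.Str.len s - 2) false

def sample_chunks_py_alt (chunks : List String) (max_total_chars : Int) : String :=
  if chunks = [] then ""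
  else if chunks.length = 1 then (PySem.List.pyGet? chunks 0).getD ""
  else emitB chunks (indicesB chunks) max_total_chars true

-- ===== PRECONDITION & SPEC =====
def Spec_sample_chunks_py (chunks : List String) (max_total_chars : Int) (out : String) : Prop := out = sample_chunks_py_alt chunks max_total_chars
instance (chunks : List String) (max_total_chars : Int) (out : String) : Decidable (Spec_sample_chunks_py chunks max_total_chars out) := by unfold Spec_sample_chunks_py; infer_instance

-- ===== CLAIM (what is proved, stated in full; the proofs are below) =====
def Claim_equal_sample_chunks_py : Prop := ∀ (chunks : List String) (max_total_chars : Int), Dom_sample_chunks_py chunks max_total_chars → Spec_sample_chunks_py chunks max_total_chars (sample_chunks_py chunks max_total_chars)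

-- ===== LEMMAS AND PROOFS =====

-- ---- the index lists agree ----

theorem mem_middlesB (nm1 step : Int) (hs : 0 < step) :
    ∀ (fuel : Nat) (i x : Int), (nm1 - i).toNat ≤ fuel →
      (x ∈ middlesB nm1 step fuel i ↔ i ≤ x ∧ x < nm1 ∧ step ∣ x - i) := by
  intro fuel
  induction fuel with
  | zero => intro i x hf; simp [middlesB]; omega
  | succ n ih =>
    intro i x hf
    by_cases h : i < nm1
    · have hrec := ih (i + step) x (by omega)
      simp only [middlesB, if_pos h, List.mem_cons, hrec]
      constructor
      · rintro (rfl | ⟨h1, h2, h3⟩)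
        · exact ⟨le_refl _, h, ⟨0, by ring⟩⟩
        · refine ⟨by omega, h2, ?_⟩
          have : x - i = (x - (i + step)) + step := by ring
          rw [this]; exact dvd_add h3 dvd_rfl
      · rintro ⟨h1, h2, h3⟩
        by_cases hx : x = i
        · exact Or.inl hx
        · right
          have hpos : 0 < x - i := by omega
          have hge : step ≤ x - i := Int.le_of_dvd hpos h3
          refine ⟨by omega, h2, ?_⟩
          have : x - (i + step) = (x - i) + (-1) * step := by ring
          rw [this]; exact dvd_add h3 (Dvd.dvd.mul_left dvd_rfl _)
    · simp [middlesB, if_neg h]; omega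

theorem pairwise_middlesB (nm1 step : Int) (hs : 0 < step) :
    ∀ (fuel : Nat) (i : Int), (nm1 - i).toNat ≤ fuel →
      (middlesB nm1 step fuel i).Pairwise (· < ·) := by
  intro fuel
  induction fuel with
  | zero => intro i _; simp [middlesB]
  | succ n ih =>
    intro i hf
    by_cases h : i < nm1
    · simp only [middlesB, if_pos h, List.pairwise_cons]
      refine ⟨?_, ih (i + step) (by omega)⟩
      intro y hy
      have := (mem_middlesB nm1 step hs n (i + step) y (by omega)).mp hy
      omega
    · simp [middlesB, if_neg h]

theorem pairwise_pyRange_pos (a b step : Int) (hs : 0 < step) :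
    (PySem.List.pyRange a b step).Pairwise (· < ·) := by
  rw [PySem.List.pyRange_of_pos a b hs]
  refine List.Pairwise.map _ ?_ List.pairwise_lt_range
  intro p q hpq
  have : (p : Int) < (q : Int) := by exact_mod_cast hpq
  nlinarith

theorem middlesB_eq_pyRange (nm1 step : Int) (hs : 0 < step) (fuel : Nat) (i : Int)
    (hf : (nm1 - i).toNat ≤ fuel) :
    middlesB nm1 step fuel i = PySem.List.pyRange i nm1 step := by
  have hpwM := pairwise_middlesB nm1 step hs fuel i hf
  have hpwR := pairwise_pyRange_pos i nm1 step hs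
  have hperm : (PySem.List.pyRange i nm1 step).Perm (middlesB nm1 step fuel i) := by
    rw [List.perm_ext_iff_of_nodup (hpwR.imp ne_of_lt) (hpwM.imp ne_of_lt)]
    intro x
    rw [PySem.List.mem_pyRange_iff_of_pos hs, mem_middlesB nm1 step hs fuel i x hf]
  calc middlesB nm1 step fuel i
      = PySem.List.sorted (PySem.List.pyRange i nm1 step) (fun x => x) false := by
        rw [PySem.List.sorted_eq_of_perm_of_pairwise_lt _ _ _ hperm.symm hpwM]
    _ = PySem.List.pyRange i nm1 step := by
        exact PySem.List.sorted_eq_self_of_pairwise _ _ (hpwR.imp (fun h => le_of_lt h))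

-- the A-side index list, before dedup/sort, written with n = chunks.length
theorem sampleIndices_eq_indicesB (chunks : List String) (h2 : 2 ≤ chunks.length) :
    sampleIndices chunks = indicesB chunks := by
  set n : Int := (chunks.length : Int) with hn
  set step : Int := max 1 (PySem.Int.floordiv n 4) with hstep
  have hs : 0 < step := by omega
  have hL : ([(0 : Int)] ++ (if n > 2 then PySem.List.pyRange step (n - 1) step else []) ++
      [n - 1]).Pairwise (· < ·) := by
    by_cases h3 : n > 2
    · rw [if_pos h3]
      have hmem : ∀ x ∈ PySem.List.pyRange step (n - 1) step, step ≤ x ∧ x < n - 1 := by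
        intro x hx
        have := (PySem.List.mem_pyRange_iff_of_pos hs x).mp hx
        exact ⟨this.1, this.2.1⟩
      simp only [List.cons_append, List.nil_append, List.pairwise_cons, List.pairwise_append,
        List.mem_append, List.mem_singleton]
      refine ⟨?_, pairwise_pyRange_pos _ _ _ hs, ⟨by simp, List.Pairwise.nil⟩, ?_⟩
      · rintro y (hy | rfl)
        · have := hmem y hy; omega
        · omega
      · intro x hx y hy
        subst hy
        have := hmem x hx; omega
    · rw [if_neg h3]
      have : n = 2 := by omega
      simp [this]
  have hnodup := hL.imp (fun {a b} (h : a < b) => ne_of_lt h)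
  have hle := hL.imp (fun {a b} (h : a < b) => le_of_lt h)
  unfold sampleIndices indicesB
  rw [← hn, ← hstep]
  rw [PySem.Set.ofList_eq_self_of_nodup _ hnodup,
    PySem.List.sorted_eq_self_of_pairwise _ _ hle]
  by_cases h3 : n > 2
  · rw [if_pos h3, if_pos h3,
      middlesB_eq_pyRange (n - 1) step hs chunks.length step (by omega)]
  · rw [if_neg h3, if_neg h3]
    have : n = 2 := by omega
    simp [this]

-- ---- the accumulation loops agree ----

-- A's loop depends on (M, cur) only through the remaining budget M - cur
def coreL (chunks : List String) : List Int → Int → List String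
  | [], _ => []
  | i :: rest, budget =>
    let s := (PySem.List.pyGet? chunks i).getD ""
    if PySem.Str.len s > budget then
      if budget > 200 then [PySem.Str.slice s (some 0) (some budget)] else []
    else s :: coreL chunks rest (budget - PySem.Str.len s - 2)

theorem sampleLoopA_eq_coreL (chunks : List String) (M : Int) :
    ∀ (idxs : List Int) (comb : List String) (cur : Int),
      sampleLoopA chunks M idxs comb cur = comb ++ coreL chunks idxs (M - cur) := by
  intro idxs
  induction idxs with
  | nil => intro comb cur; simp [sampleLoopA, coreL]
  | cons i rest ih =>
    intro comb cur
    simp only [sampleLoopA, coreL]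
    set s := (PySem.List.pyGet? chunks i).getD "" with hsdef
    by_cases h : cur + PySem.Str.len s > M
    · rw [if_pos h, if_pos (by omega : PySem.Str.len s > M - cur)]
      split_ifs <;> simp
    · rw [if_neg h, if_neg (by omega : ¬ PySem.Str.len s > M - cur), ih]
      have : M - (cur + PySem.Str.len s + 2) = M - cur - PySem.Str.len s - 2 := by ring
      rw [this]; simp

-- join "\n\n" with an optional leading separator, as emitB produces it
theorem chars_join_cons (sep s : List Char) (l : List (List Char)) :
    PySem.Chars.join sep (s :: l) = s ++ PySem.Chars.join sep ([] :: l) := by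
  cases l with
  | nil => simp [PySem.Chars.join_singleton]
  | cons b l' => simp [PySem.Chars.join_cons_cons]

theorem emitB_eq_coreL (chunks : List String) :
    ∀ (idxs : List Int) (budget : Int) (first : Bool),
      emitB chunks idxs budget first =
        PySem.Str.join "\n\n" (if first then coreL chunks idxs budget
                               else "" :: coreL chunks idxs budget) := by
  intro idxs
  induction idxs with
  | nil =>
    intro budget first
    cases first <;>
      simp [emitB, coreL, ← String.toList_inj, PySem.Str.toList_join,
        PySem.Chars.join_nil, PySem.Chars.join_singleton]
  | cons i rest ih =>
    intro budget first
    simp only [emitB, coreL]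
    set s := (PySem.List.pyGet? chunks i).getD "" with hsdef
    have hsl : (PySem.Str.slice s none (some budget)).toList
        = (PySem.Str.slice s (some 0) (some budget)).toList := by
      simp [PySem.List.slice_zero_start]
    by_cases h : PySem.Str.len s > budget
    · rw [if_pos h, if_pos h]
      by_cases hb : budget > 200
      · rw [if_pos hb, if_pos hb]
        cases first <;>
          simp [← String.toList_inj, String.toList_append, hsl, PySem.Str.toList_join,
            PySem.Chars.join_singleton, PySem.Chars.join_cons_cons]
      · rw [if_neg hb, if_neg hb]
        cases first <;>
          simp [← String.toList_inj, PySem.Str.toList_join,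
            PySem.Chars.join_nil, PySem.Chars.join_singleton]
    · rw [if_neg h, if_neg h, ih _ false]
      cases first
      · rw [← String.toList_inj]
        simp only [Bool.false_eq_true, if_false, String.toList_append,
          PySem.Str.toList_join, List.map_cons, String.toList_empty]
        conv_rhs => rw [PySem.Chars.join_cons_cons, chars_join_cons]
        simp
      · rw [← String.toList_inj]
        simp only [if_pos, String.toList_append, PySem.Str.toList_join, List.map_cons,
          String.toList_empty]
        conv_rhs => rw [chars_join_cons]
        simp

-- ===== VERDICT (by name: the statement is the Claim_ definition above) =====
theorem sample_chunks_py_spec : Claim_equal_sample_chunks_py := by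
  intro chunks M _
  unfold Spec_sample_chunks_py sample_chunks_py sample_chunks_py_alt
  by_cases h0 : chunks = []
  · simp [h0]
  · by_cases h1 : chunks.length = 1
    · simp [h0, h1]
    · have h2 : 2 ≤ chunks.length := by
        cases chunks with
        | nil => exact absurd rfl h0
        | cons a t => cases t with
          | nil => exact absurd rfl h1
          | cons b t' => simp
      rw [if_neg h0, if_neg h1, if_neg h0, if_neg h1,
        sampleLoopA_eq_coreL chunks M (sampleIndices chunks) [] 0,
        emitB_eq_coreL chunks (indicesB chunks) M true,
        sampleIndices_eq_indicesB chunks h2]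
      simp
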